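-- pv_equiv track=rewrite | github.com/RajJagasia/PythonCoursework | py_cw.py | imult
-- ===== SOURCE A (Python) =====
-- def iint(n):
--     ans_iint=[]
--     while n!=0:              # While n is not equal to 0
--         current_digit=n%10       #We will store the digit that is in the ones place
--         ans_iint+=[current_digit]     #Append the list with current_digit
--         n=n//10               #Removed the digit added so the next didit will be add to the list in the next loop
--     return ans_iint
--
-- def pint(I):
--     place=1
--     ans_pint=0
--     for i in I:
--         ans_pint+=i*place
--         place*=10
--
--     return ans_pint
--
-- def iadd(I,J):
--
--     ans_iadd=[]
--     Len_of_I=len(I)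
--     Len_of_J=len(J)
--
--     if Len_of_I>Len_of_J:
--         difference=Len_of_I-Len_of_J    # Checking how many extra digits I has compared to J
--         for i in range(difference):
--             J+=[0]      #So we can add 0's at the end of J so that it wont show index out of range error and our also won't be affected
--
--     elif Len_of_I<Len_of_J:
--         difference=Len_of_J-Len_of_I    # Checking how many extra digits J has compared to I
--         for i in range(difference):
--             I+=[0]      #So we can add 0's at the end of I so that it wont show index out of range error and our also won't be affected
--
--     for i in range(len(I)):   #Instead of len(I) we can also write len(J) as both are the same
--         ans_iadd+=[I[i]+J[i]]   #This will contain the sum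
--
--     return pint(ans_iadd)        #This will return the integer form of the answer
--
-- def imult(I,J):
--
--     temp_list_imult=[]      #This list will store the list of each element of J multiplied with the whole I list
--     place=0                 #this is the place where the element is
--
--     for i in I:   #Iterating through list I
--         temp=[]
--         for j in J:   #Iterating through list J
--             temp+=[j*i]       #This is where each individual element will multiply and be stored
--
--         for k in range(place):
--             temp.insert(0,0)            #This is where 0's are added based on place
--         #After 0's are added then then list is ready to be put in temp_list_imult where the lists of it will be add to each other later.
--         temp_list_imult+=[temp]
--         place+=1                    #Incrementing place by 1 each time it loops
--
--     ans_imult=0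
--     for i in temp_list_imult:
--         ans_imult=iadd(iint(ans_imult),i)   #This is where all the lists in temp_list_imult are being added to ans_imult
--                                             #I am using Multiplication is reapeated addition logic here
--
--     return ans_imult               #This will return the integer form of the answer
-- ===== SOURCE B (Python) =====
-- def imult(I, J):
--     # Evaluate each little-endian digit list as an integer with one weighted
--     # positional pass, then multiply the two integers.
--     vi = 0
--     place = 1
--     for d in I:
--         vi += d * place
--         place *= 10
--     vj = 0
--     place = 1
--     for d in J:
--         vj += d * place
--         place *= 10
--     return vi * vj
-- ===== Notes on version B (the rewrite author's own statement) =====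
-- stated objective: simpler
-- what changed: B evaluates each digit list to its integer value in one linear pass and returns the product, replacing A's nested pairwise-product lists, zero-padding, and repeated iint/iadd/pint digit-list round-trips.
import Mathlib
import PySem

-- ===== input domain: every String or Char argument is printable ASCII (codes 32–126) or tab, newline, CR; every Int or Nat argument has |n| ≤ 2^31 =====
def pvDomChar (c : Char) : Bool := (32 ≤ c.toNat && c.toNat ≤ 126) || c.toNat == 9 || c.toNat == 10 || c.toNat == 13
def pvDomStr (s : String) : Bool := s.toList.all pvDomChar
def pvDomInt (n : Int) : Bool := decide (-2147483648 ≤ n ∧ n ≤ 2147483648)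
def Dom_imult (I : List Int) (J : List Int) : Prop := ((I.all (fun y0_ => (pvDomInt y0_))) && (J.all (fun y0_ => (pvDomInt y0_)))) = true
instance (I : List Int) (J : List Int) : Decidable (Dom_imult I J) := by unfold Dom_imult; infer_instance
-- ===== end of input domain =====

-- B is simpler: it evaluates each digit list to its integer in one pass and multiplies,
-- instead of A's nested pairwise-product lists folded by repeated iint/iadd/pint round-trips.
-- A and B only read their arguments via iteration/indexing; no observable mutation escapes imult.

-- ===== PORT A =====

-- Python 'iint': while n != 0: collect n % 10, n //= 10.  Python diverges for n < 0
-- (n//10 converges to -1); this port returns [] there, a point Pre_imult excludes.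
def iintA (n : Int) : List Int :=
  if h : 0 < n then PySem.Int.mod n 10 :: iintA (PySem.Int.floordiv n 10) else []
termination_by n.toNat
decreasing_by
  have h1 : PySem.Int.floordiv n 10 = n / 10 := PySem.Int.floordiv_eq_ediv_of_pos (by omega)
  simp only [h1]
  omega

-- Python 'pint': place=1, ans=0; for i in I: ans += i*place; place *= 10.
def pintA (I : List Int) : Int :=
  (I.foldl (fun (st : Int × Int) i => (st.1 * 10, st.2 + i * st.1)) (1, 0)).2

-- Python 'iadd': pad the shorter list with trailing zeros, add index-wise, return pint.
def iaddA (I J : List Int) : Int :=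
  let I' := I ++ List.replicate (J.length - I.length) 0
  let J' := J ++ List.replicate (I.length - J.length) 0
  pintA ((List.range I'.length).map (fun k => I'.getD k 0 + J'.getD k 0))

-- Python 'imult': build temp_list (each digit of I times J, shifted by 'place' zeros),
-- then fold ans = iadd(iint(ans), temp) over it.
def imult (I : List Int) (J : List Int) : Int :=
  let temp_list :=
    (I.foldl (fun (st : List (List Int) × Nat) i =>
        (st.1 ++ [List.replicate st.2 0 ++ J.map (fun j => j * i)], st.2 + 1)) ([], 0)).1
  temp_list.foldl (fun ans t => iaddA (iintA ans) t) 0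

-- ===== PORT B =====
def imult_alt (I : List Int) (J : List Int) : Int :=
  let vi := (I.foldl (fun (s : Int × Int) d => (s.1 + d * s.2, s.2 * 10)) (0, 1)).1
  let vj := (J.foldl (fun (s : Int × Int) d => (s.1 + d * s.2, s.2 * 10)) (0, 1)).1
  vi * vj

-- ===== PRECONDITION & SPEC =====

-- value of a little-endian digit list (closed-form weighted sum, used only to state Pre_)
def sumval (L : List Int) : Int := L.foldr (fun d acc => d + 10 * acc) 0

-- Pre_ excludes exactly the inputs where Python A diverges: iint is applied to the running
-- total before each iteration after the first, and iint(n) loops forever for n < 0, so A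
-- returns iff every such intermediate total pint(I[:k])*pint(J) (1 ≤ k < len(I)) is ≥ 0.
def Pre_imult (I : List Int) (J : List Int) : Prop :=
  ∀ k : Nat, k < I.length → 1 ≤ k → 0 ≤ sumval (I.take k) * sumval J

instance (I : List Int) (J : List Int) : Decidable (Pre_imult I J) := by
  unfold Pre_imult; infer_instance

def pvWitness_imult : List Int × List Int := ([2, 3, 1], [4, 5])

def Spec_imult (I : List Int) (J : List Int) (out : Int) : Prop := out = imult_alt I J
instance (I : List Int) (J : List Int) (out : Int) : Decidable (Spec_imult I J out) := by unfold Spec_imult; infer_instance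

-- ===== CLAIM (what is proved, stated in full; the proofs are below) =====
def Claim_equal_imult : Prop := ∀ (I : List Int) (J : List Int), Dom_imult I J → Pre_imult I J → Spec_imult I J (imult I J)

-- ===== LEMMAS AND PROOFS =====

theorem sumval_nil : sumval [] = 0 := rfl
theorem sumval_cons (d : Int) (t : List Int) : sumval (d :: t) = d + 10 * sumval t := rfl

theorem pint_fold (L : List Int) : ∀ (p a : Int),
    (L.foldl (fun (st : Int × Int) i => (st.1 * 10, st.2 + i * st.1)) (p, a)).2
      = a + p * sumval L := by
  induction L with
  | nil => intro p a; simp [sumval_nil]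
  | cons d t ih => intro p a; simp only [List.foldl_cons, ih, sumval_cons]; ring

theorem pintA_eq (L : List Int) : pintA L = sumval L := by
  simp [pintA, pint_fold]

theorem alt_fold (L : List Int) : ∀ (a p : Int),
    (L.foldl (fun (s : Int × Int) d => (s.1 + d * s.2, s.2 * 10)) (a, p)).1
      = a + p * sumval L := by
  induction L with
  | nil => intro a p; simp [sumval_nil]
  | cons d t ih => intro a p; simp only [List.foldl_cons, ih, sumval_cons]; ring

theorem imult_alt_eq (I J : List Int) : imult_alt I J = sumval I * sumval J := by
  simp [imult_alt, alt_fold]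

theorem sumval_replicate_zero (k : Nat) : sumval (List.replicate k 0) = 0 := by
  induction k with
  | zero => rfl
  | succ m ih => simp [List.replicate_succ, sumval_cons, ih]

theorem sumval_append_replicate (L : List Int) (k : Nat) :
    sumval (L ++ List.replicate k 0) = sumval L := by
  induction L with
  | nil => simpa using sumval_replicate_zero k
  | cons d t ih => simp [sumval_cons, ih]

theorem sumval_replicate_append (k : Nat) (L : List Int) :
    sumval (List.replicate k 0 ++ L) = 10 ^ k * sumval L := by
  induction k with
  | zero => simp
  | succ m ih => simp [List.replicate_succ, sumval_cons, ih]; ring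

theorem sumval_map_mul (J : List Int) (c : Int) :
    sumval (J.map (fun j => j * c)) = sumval J * c := by
  induction J with
  | nil => simp [sumval_nil]
  | cons d t ih => simp [sumval_cons, ih]; ring

theorem iintA_eq (n : Int) (hn : 0 ≤ n) : sumval (iintA n) = n := by
  induction n using iintA.induct with
  | case1 n h ih =>
    have h1 : PySem.Int.floordiv n 10 = n / 10 := PySem.Int.floordiv_eq_ediv_of_pos (by omega)
    have h2 : PySem.Int.mod n 10 = n % 10 := PySem.Int.mod_eq_emod_of_pos (by omega)
    have h3 : 0 ≤ n / 10 := Int.ediv_nonneg (le_of_lt h) (by omega)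
    rw [iintA, dif_pos h, sumval_cons, ih (by rw [h1]; exact h3), h1, h2]
    omega
  | case2 n h =>
    rw [iintA, dif_neg h, sumval_nil]
    omega

theorem sumval_mapRange : ∀ (I J : List Int), I.length = J.length →
    sumval ((List.range I.length).map (fun k => I.getD k 0 + J.getD k 0))
      = sumval I + sumval J := by
  intro I
  induction I with
  | nil => intro J h; simp [sumval_nil]; rw [(List.length_eq_zero_iff).1 h.symm]; rfl
  | cons d t ih =>
    intro J h
    match J with
    | [] => simp at h
    | e :: u =>
      simp only [List.length_cons] at h ⊢
      rw [List.range_succ_eq_map, List.map_cons, List.map_map]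
      have : ((List.range t.length).map ((fun k => (d :: t).getD k 0 + (e :: u).getD k 0) ∘ Nat.succ))
           = (List.range t.length).map (fun k => t.getD k 0 + u.getD k 0) := by
        apply List.map_congr_left; intro k _; rfl
      rw [this, sumval_cons, ih u (by omega), sumval_cons, sumval_cons]
      simp only [List.getD_cons_zero]
      ring

theorem iaddA_eq (I J : List Int) : iaddA I J = sumval I + sumval J := by
  unfold iaddA
  have hlen : (I ++ List.replicate (J.length - I.length) 0).length
            = (J ++ List.replicate (I.length - J.length) 0).length := by
    simp; omega
  rw [pintA_eq, sumval_mapRange _ _ hlen, sumval_append_replicate, sumval_append_replicate]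

-- the builder loop of A: temp_list as a map over range
theorem temp_list_spec (J : List Int) : ∀ (I : List Int) (acc : List (List Int)) (p : Nat),
    (I.foldl (fun (st : List (List Int) × Nat) i =>
        (st.1 ++ [List.replicate st.2 0 ++ J.map (fun j => j * i)], st.2 + 1)) (acc, p)).1
      = acc ++ (List.range I.length).map
          (fun a => List.replicate (p + a) 0 ++ J.map (fun j => j * I.getD a 0)) := by
  intro I
  induction I with
  | nil => intro acc p; simp
  | cons i t ih =>
    intro acc p
    simp only [List.foldl_cons, List.length_cons]
    rw [ih, List.range_succ_eq_map, List.map_cons, List.map_map, List.append_assoc,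
      List.singleton_append]
    congr 1
    congr 1
    apply List.map_congr_left
    intro a ha
    simp only [Function.comp_apply, List.getD_cons_succ]
    have hpa : p + 1 + a = p + (a + 1) := by omega
    rw [hpa]

-- the accumulation loop of A, valid while every intermediate total fed to iint is ≥ 0
theorem fold_iadd : ∀ (ts : List (List Int)) (a : Int),
    (∀ k : Nat, k < ts.length → 0 ≤ a + (((ts.take k).map sumval).sum)) →
    ts.foldl (fun ans t => iaddA (iintA ans) t) a = a + ((ts.map sumval).sum) := by
  intro ts
  induction ts with
  | nil => intro a _; simp
  | cons t rest ih =>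
    intro a h
    have h0 : 0 ≤ a := by simpa using h 0 (by simp)
    have step : iaddA (iintA a) t = a + sumval t := by
      rw [iaddA_eq, iintA_eq a h0]
    simp only [List.foldl_cons, step, List.map_cons, List.sum_cons]
    rw [ih (a + sumval t) ?_]
    · ring
    · intro k hk
      have := h (k + 1) (by simpa using Nat.succ_lt_succ hk)
      simpa [List.take_succ_cons, add_assoc] using this

theorem sum_weighted (c : Int) : ∀ (I : List Int),
    (((List.range I.length).map (fun a => 10 ^ a * I.getD a 0 * c)).sum) = sumval I * c := by
  intro I
  induction I with
  | nil => simp [sumval_nil]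
  | cons d t ih =>
    simp only [List.length_cons]
    rw [List.range_succ_eq_map, List.map_cons, List.map_map]
    have : ((List.range t.length).map ((fun a => 10 ^ a * (d :: t).getD a 0 * c) ∘ Nat.succ))
         = (List.range t.length).map (fun a => 10 * (10 ^ a * t.getD a 0 * c)) := by
      apply List.map_congr_left; intro a _
      simp only [Function.comp, List.getD_cons_succ, pow_succ]
      ring
    rw [this, List.sum_cons, List.sum_map_mul_left, ih, sumval_cons]
    simp only [pow_zero, List.getD_cons_zero]
    ring

theorem getD_take (I : List Int) (k a : Nat) (ha : a < k) :
    (I.take k).getD a 0 = I.getD a 0 := by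
  simp [List.getD_eq_getElem?_getD, ha]

theorem imult_spec_proof (I J : List Int) (hpre : Pre_imult I J) :
    imult I J = imult_alt I J := by
  rw [imult_alt_eq]
  unfold imult
  rw [temp_list_spec]
  simp only [List.nil_append, Nat.zero_add]
  set f : Nat → List Int := fun a => List.replicate a 0 ++ J.map (fun j => j * I.getD a 0) with hf
  have hsv : ∀ a : Nat, sumval (f a) = 10 ^ a * I.getD a 0 * sumval J := by
    intro a
    rw [hf]
    simp only
    rw [sumval_replicate_append, sumval_map_mul]
    ring
  have hmapsum : ∀ (n : Nat), n ≤ I.length →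
      ((((List.range n).map f).map sumval).sum) = sumval (I.take n) * sumval J := by
    intro n hn
    rw [List.map_map]
    have : ((List.range n).map (sumval ∘ f)) =
        (List.range (I.take n).length).map (fun a => 10 ^ a * (I.take n).getD a 0 * sumval J) := by
      rw [List.length_take, Nat.min_eq_left hn]
      apply List.map_congr_left
      intro a ha
      simp only [List.mem_range] at ha
      rw [Function.comp_apply, hsv a, getD_take I n a ha]
    rw [this, sum_weighted]
  rw [fold_iadd]
  · rw [hmapsum I.length (le_refl _), List.take_length, zero_add]
  · intro k hk
    simp only [List.length_map, List.length_range] at hk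
    rw [← List.map_take, List.take_range, Nat.min_eq_left (le_of_lt hk)]
    rw [hmapsum k (le_of_lt hk), zero_add]
    rcases Nat.eq_zero_or_pos k with h0 | h1
    · subst h0; simp [sumval_nil]
    · exact hpre k hk h1

-- ===== VERDICT (by name: the statement is the Claim_ definition above) =====
theorem imult_spec : Claim_equal_imult := by
  intro I J _ hpre
  exact imult_spec_proof I J hpre
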